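-- pv_equiv track=rewrite | github.com/teampavement/pavement | api/api.py | get_bucketed_spaces
-- ===== SOURCE A (Python) =====
-- import bisect, collections, operator, os, sys, pytz
--
-- def get_bucketed_spaces(spaces, times):
--     bucketed_spaces = [set() for _ in times]
--
--     for id, start_time, end_time in spaces:
--         if end_time is None:
--             continue
--
--         for i in range(bisect.bisect_left(times, start_time) - 1, bisect.bisect_right(times, end_time)):
--             if i < 0:
--                 continue
--             bucketed_spaces[i].add(id)
--
--     return bucketed_spaces
-- ===== SOURCE B (Python) =====
-- import bisect
--
-- def get_bucketed_spaces(spaces, times):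
--     cov = []
--     for id, start_time, end_time in spaces:
--         if end_time is None:
--             continue
--         lo = max(bisect.bisect_left(times, start_time) - 1, 0)
--         hi = bisect.bisect_right(times, end_time)
--         if lo < hi:
--             cov.append((id, lo, hi))
--     return [{id for id, lo, hi in cov if lo <= i < hi}
--             for i in range(len(times))]
-- ===== Notes on version B (the rewrite author's own statement) =====
-- stated objective: alternative
-- what changed: B precomputes each space's clamped bucket interval (id, lo, hi) in one bisect pass and then builds every bucket with a per-bucket set comprehension over those intervals, instead of A's per-space inner loop that range-fills mutable bucket sets in place.
import Mathlib
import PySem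

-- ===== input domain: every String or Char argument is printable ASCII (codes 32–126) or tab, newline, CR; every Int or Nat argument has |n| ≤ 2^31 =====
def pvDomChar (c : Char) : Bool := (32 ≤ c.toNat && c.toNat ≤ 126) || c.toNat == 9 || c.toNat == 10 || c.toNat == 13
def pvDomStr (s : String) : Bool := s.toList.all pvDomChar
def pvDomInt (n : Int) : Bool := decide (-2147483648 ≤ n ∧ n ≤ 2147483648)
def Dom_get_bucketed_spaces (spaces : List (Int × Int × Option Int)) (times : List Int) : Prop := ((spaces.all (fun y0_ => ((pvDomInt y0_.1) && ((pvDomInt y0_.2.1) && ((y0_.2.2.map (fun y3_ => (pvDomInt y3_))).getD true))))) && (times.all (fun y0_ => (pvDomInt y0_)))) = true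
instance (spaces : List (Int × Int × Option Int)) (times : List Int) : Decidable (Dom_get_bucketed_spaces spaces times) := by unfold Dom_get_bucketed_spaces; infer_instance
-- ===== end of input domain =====

-- B precomputes each space's clamped bucket interval once and builds every bucket by a
-- per-bucket comprehension over those intervals, instead of A's per-space range-filling of
-- mutable bucket sets (alternative decomposition; equivalence is total).

-- ===== PORT A =====
-- the per-space inner loop: 'for i in range(bisect_left(times, start)-1, bisect_right(times, end)):
--   if i < 0: continue
--   bucketed_spaces[i].add(id)'
def pvFillOne (id : Int) (a b : Int) (bucketed : List (List Int)) : List (List Int) :=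
  (PySem.List.pyRange a b 1).foldl
    (fun bucketed i =>
      if i < 0 then bucketed
      else PySem.List.pySetD bucketed i
        (PySem.Set.add (PySem.List.pyGetD bucketed i PySem.Set.empty) id))
    bucketed


def get_bucketed_spaces (spaces : List (Int × Int × Option Int)) (times : List Int) : List (List Int) :=
  let bucketed0 : List (List Int) := times.map (fun _ => (PySem.Set.empty : PySem.Set Int))
  spaces.foldl
    (fun bucketed s =>
      match s.2.2 with
      | none => bucketed
      | some end_time =>
        pvFillOne s.1 ((PySem.List.bisectLeft times s.2.1 : Int) - 1)
          ((PySem.List.bisectRight times end_time : Int)) bucketed)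
    bucketed0


-- ===== PORT B =====
-- first pass of B: cov = [(id, lo, hi)] of non-empty clamped bucket intervals
def pvCov (spaces : List (Int × Int × Option Int)) (times : List Int) : List (Int × Int × Int) :=
  spaces.foldl
    (fun cov s =>
      match s.2.2 with
      | none => cov
      | some end_time =>
        let lo : Int := max ((PySem.List.bisectLeft times s.2.1 : Int) - 1) 0
        let hi : Int := (PySem.List.bisectRight times end_time : Int)
        if lo < hi then cov ++ [(s.1, lo, hi)] else cov)
    []


def get_bucketed_spaces_alt (spaces : List (Int × Int × Option Int)) (times : List Int) : List (List Int) :=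
  let cov := pvCov spaces times
  (List.range times.length).map (fun (i : Nat) =>
    (PySem.Set.ofList
      ((cov.filter (fun t => decide (t.2.1 ≤ (i : Int) ∧ (i : Int) < t.2.2))).map (·.1)) : PySem.Set Int))


-- ===== PRECONDITION & SPEC =====
def Spec_get_bucketed_spaces (spaces : List (Int × Int × Option Int)) (times : List Int) (out : List (List Int)) : Prop := out = get_bucketed_spaces_alt spaces times
instance (spaces : List (Int × Int × Option Int)) (times : List Int) (out : List (List Int)) : Decidable (Spec_get_bucketed_spaces spaces times out) := by unfold Spec_get_bucketed_spaces; infer_instance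

-- ===== CLAIM (what is proved, stated in full; the proofs are below) =====
def Claim_equal_get_bucketed_spaces : Prop := ∀ (spaces : List (Int × Int × Option Int)) (times : List Int), Dom_get_bucketed_spaces spaces times → Spec_get_bucketed_spaces spaces times (get_bucketed_spaces spaces times)

-- ===== LEMMAS AND PROOFS =====

theorem pvFillOne_step (id : Int) (a b : Int) (bucketed : List (List Int)) (h : a < b) :
    pvFillOne id a b bucketed = pvFillOne id (a+1) b
      (if a < 0 then bucketed
       else PySem.List.pySetD bucketed a
        (PySem.Set.add (PySem.List.pyGetD bucketed a PySem.Set.empty) id)) := by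
  unfold pvFillOne
  rw [PySem.List.pyRange_one_cons h, List.foldl_cons]

theorem pvFillOne_nil (id : Int) (a b : Int) (bucketed : List (List Int)) (h : b ≤ a) :
    pvFillOne id a b bucketed = bucketed := by
  unfold pvFillOne
  rw [PySem.List.pyRange_one_eq_nil h, List.foldl_nil]

theorem pvFillOne_getElem? (id a b : Int) (bucketed : List (List Int)) (j : Nat) :
    (pvFillOne id a b bucketed)[j]? =
      if a ≤ (j : Int) ∧ (j : Int) < b then
        bucketed[j]?.map (fun s => PySem.Set.add s id)
      else bucketed[j]? := by
  by_cases h : a < b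
  · rw [pvFillOne_step id a b bucketed h]
    rw [pvFillOne_getElem? id (a+1) b _ j]
    by_cases hjl : j < bucketed.length
    · have hFj : (if a < 0 then bucketed
          else PySem.List.pySetD bucketed a
            (PySem.Set.add (PySem.List.pyGetD bucketed a PySem.Set.empty) id))[j]? =
          if a = (j : Int) then bucketed[j]?.map (fun s => PySem.Set.add s id)
          else bucketed[j]? := by
        by_cases hneg : a < 0
        · have : ¬ a = (j : Int) := by omega
          simp [hneg, this]
        · rw [if_neg hneg, PySem.List.pySetD_of_nonneg bucketed _ (by omega), List.getElem?_set]
          by_cases heq : a = (j : Int)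
          · have haj : a.toNat = j := by omega
            rw [if_pos heq]
            have hg : PySem.List.pyGetD bucketed a ([] : List Int) = bucketed[j]'hjl := by
              rw [PySem.List.pyGetD_eq_getElem bucketed [] (by omega)
                (by rw [heq]; exact_mod_cast hjl)]
              simp [haj]
            simp [haj, hjl]
            exact congrArg (fun s => PySem.Set.add s id) hg
          · have haj : ¬ a.toNat = j := by omega
            simp [haj, heq]
      rw [hFj]
      by_cases hc : a ≤ (j:Int) ∧ (j:Int) < b
      · rw [if_pos hc]
        by_cases heq : a = (j:Int)
        · rw [if_neg (by omega : ¬((a+1) ≤ (j:Int) ∧ (j:Int) < b)), if_pos heq]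
        · rw [if_pos (by omega : (a+1) ≤ (j:Int) ∧ (j:Int) < b), if_neg heq]
      · rw [if_neg hc, if_neg (by omega : ¬((a+1) ≤ (j:Int) ∧ (j:Int) < b)),
          if_neg (by omega : ¬ a = (j:Int))]
    · have hn : bucketed[j]? = none := by
        simp; omega
      have hn2 : (if a < 0 then bucketed
          else PySem.List.pySetD bucketed a
            (PySem.Set.add (PySem.List.pyGetD bucketed a PySem.Set.empty) id))[j]? = none := by
        split_ifs
        · exact hn
        · rw [PySem.List.pySetD_of_nonneg bucketed _ (by omega)]
          simp; omega
      rw [hn2, hn]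
      split_ifs <;> simp
  · rw [pvFillOne_nil id a b bucketed (by omega)]
    have : ¬ (a ≤ (j : Int) ∧ (j : Int) < b) := by omega
    simp [this]
termination_by (b - a).toNat
decreasing_by omega

def pvCoverIds (spaces : List (Int × Int × Option Int)) (times : List Int) (j : Int) : List Int :=
  (spaces.filter (fun s =>
    match s.2.2 with
    | none => false
    | some e => decide ((PySem.List.bisectLeft times s.2.1 : Int) - 1 ≤ j ∧
                        j < (PySem.List.bisectRight times e : Int)))).map (·.1)


theorem pvFoldA_getElem? (spaces : List (Int × Int × Option Int)) (times : List Int)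
    (bucketed : List (List Int)) (j : Nat) :
    (spaces.foldl
      (fun bucketed s =>
        match s.2.2 with
        | none => bucketed
        | some end_time =>
          pvFillOne s.1 ((PySem.List.bisectLeft times s.2.1 : Int) - 1)
            ((PySem.List.bisectRight times end_time : Int)) bucketed)
      bucketed)[j]? =
      bucketed[j]?.map (fun s0 => (pvCoverIds spaces times (j : Int)).foldl PySem.Set.add s0) := by
  induction spaces generalizing bucketed with
  | nil => simp [pvCoverIds]
  | cons s rest ih =>
    rw [List.foldl_cons, ih]
    rcases s with ⟨id, st, et⟩
    rcases et with _ | e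
    · simp [pvCoverIds]
    · simp only
      rw [pvFillOne_getElem?]
      by_cases hc : (PySem.List.bisectLeft times st : Int) - 1 ≤ (j : Int) ∧
          (j : Int) < (PySem.List.bisectRight times e : Int)
      · rw [if_pos hc]
        have hc' : (PySem.List.bisectLeft times st : Int) ≤ (j:Int) + 1 ∧
            j < PySem.List.bisectRight times e := by constructor <;> omega
        simp [pvCoverIds, hc', Function.comp_def, Option.map_map]
      · rw [if_neg hc]
        have hc' : ¬ ((PySem.List.bisectLeft times st : Int) ≤ (j:Int) + 1 ∧
            j < PySem.List.bisectRight times e) := by omega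
        simp [pvCoverIds, hc']


theorem pvCovFold_filter (spaces : List (Int × Int × Option Int)) (times : List Int) (j : Nat)
    (acc : List (Int × Int × Int)) :
    (((spaces.foldl
        (fun cov s =>
          match s.2.2 with
          | none => cov
          | some end_time =>
            let lo : Int := max ((PySem.List.bisectLeft times s.2.1 : Int) - 1) 0
            let hi : Int := (PySem.List.bisectRight times end_time : Int)
            if lo < hi then cov ++ [(s.1, lo, hi)] else cov)
        acc).filter (fun t => decide (t.2.1 ≤ (j : Int) ∧ (j : Int) < t.2.2))).map (·.1)) =
      ((acc.filter (fun t => decide (t.2.1 ≤ (j : Int) ∧ (j : Int) < t.2.2))).map (·.1)) ++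
        pvCoverIds spaces times (j : Int) := by
  induction spaces generalizing acc with
  | nil => simp [pvCoverIds]
  | cons s rest ih =>
    rw [List.foldl_cons]
    rcases s with ⟨id, st, et⟩
    rcases et with _ | e
    · rw [ih]
      simp [pvCoverIds]
    · simp only
      by_cases hlh : max ((PySem.List.bisectLeft times st : Int) - 1) 0 <
          (PySem.List.bisectRight times e : Int)
      · rw [if_pos hlh, ih, List.filter_append, List.map_append]
        by_cases hc : (PySem.List.bisectLeft times st : Int) - 1 ≤ (j : Int) ∧
            (j : Int) < (PySem.List.bisectRight times e : Int)
        · have h1 : max ((PySem.List.bisectLeft times st : Int) - 1) 0 ≤ (j : Int) ∧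
              (j : Int) < (PySem.List.bisectRight times e : Int) := by
            constructor <;> omega
          have hc' : (PySem.List.bisectLeft times st : Int) ≤ (j:Int) + 1 ∧
              j < PySem.List.bisectRight times e := by constructor <;> omega
          simp [pvCoverIds, h1, hc']
        · have h1 : ¬ (max ((PySem.List.bisectLeft times st : Int) - 1) 0 ≤ (j : Int) ∧
              (j : Int) < (PySem.List.bisectRight times e : Int)) := by omega
          have hc' : ¬ ((PySem.List.bisectLeft times st : Int) ≤ (j:Int) + 1 ∧
              j < PySem.List.bisectRight times e) := by omega
          simp [pvCoverIds, hc']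
      · rw [if_neg hlh, ih]
        have hc' : ¬ ((PySem.List.bisectLeft times st : Int) ≤ (j:Int) + 1 ∧
            j < PySem.List.bisectRight times e) := by omega
        simp [pvCoverIds, hc']

-- ===== VERDICT (by name: the statement is the Claim_ definition above) =====
theorem get_bucketed_spaces_spec : Claim_equal_get_bucketed_spaces := by
  intro spaces times _
  unfold Spec_get_bucketed_spaces
  apply List.ext_getElem?
  intro j
  unfold get_bucketed_spaces get_bucketed_spaces_alt
  simp only
  rw [pvFoldA_getElem?, List.getElem?_map, List.getElem?_map]
  by_cases hj : j < times.length
  · rw [List.getElem?_eq_getElem hj,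
      List.getElem?_eq_getElem (by simpa using hj : j < (List.range times.length).length)]
    simp only [Option.map_some, List.getElem_range]
    congr 1
    have hcf := pvCovFold_filter spaces times j []
    rw [show pvCov spaces times = spaces.foldl
        (fun cov s =>
          match s.2.2 with
          | none => cov
          | some end_time =>
            let lo : Int := max ((PySem.List.bisectLeft times s.2.1 : Int) - 1) 0
            let hi : Int := (PySem.List.bisectRight times end_time : Int)
            if lo < hi then cov ++ [(s.1, lo, hi)] else cov)
        [] from rfl, hcf]
    simp only [List.filter_nil, List.map_nil, List.nil_append, PySem.Set.ofList_eq_foldl]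
    rfl
  · rw [List.getElem?_eq_none (by omega), List.getElem?_eq_none (by simp; omega)]
    rfl
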